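-- pv_equiv track=rewrite | github.com/Anton-Dahlstrom/Leetcode | 1437_check_if_all_1s_are_at_least_length_k_places_away.py | kLengthApart
-- ===== SOURCE A (Python) =====
-- def kLengthApart(nums: list[int], k: int) -> bool:
--     dist = len(nums)
--     for num in nums:
--         if num == 1:
--             if dist < k:
--                 return False
--             dist = 0
--         else:
--             dist += 1
--     return True
-- ===== SOURCE B (Python) =====
-- def kLengthApart(nums: list[int], k: int) -> bool:
--     ones = [i for i, x in enumerate(nums) if x == 1]
--     return all(b - a - 1 >= k for a, b in zip(ones, ones[1:]))
-- ===== Notes on version B (the rewrite author's own statement) =====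
-- stated objective: simpler
-- what changed: B first collects the indices of all 1s with one comprehension and then checks each consecutive pair's gap, instead of A's single pass threading a running distance counter initialised to len(nums).
-- intended difference: On inputs containing a 1 where k > len(nums) + index of the first 1 and all 1s really are at least k apart, A returns False only because of its dist = len(nums) initialisation, while B returns True, the intended answer since the first 1 has no predecessor. — e.g. on kLengthApart([1], 2): A returns false, B returns true
import Mathlib
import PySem

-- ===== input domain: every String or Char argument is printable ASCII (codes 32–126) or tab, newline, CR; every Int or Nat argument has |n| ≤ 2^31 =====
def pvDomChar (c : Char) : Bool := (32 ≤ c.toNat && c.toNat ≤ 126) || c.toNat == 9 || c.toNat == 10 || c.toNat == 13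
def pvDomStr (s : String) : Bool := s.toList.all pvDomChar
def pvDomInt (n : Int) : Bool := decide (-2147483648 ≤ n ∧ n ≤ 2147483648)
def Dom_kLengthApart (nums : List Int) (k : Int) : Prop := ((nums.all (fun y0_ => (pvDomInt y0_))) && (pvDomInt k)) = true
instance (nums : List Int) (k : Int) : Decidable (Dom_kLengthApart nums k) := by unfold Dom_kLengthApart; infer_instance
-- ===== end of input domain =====

-- B collects the indices of the 1s and checks consecutive gaps (simpler, same cost);
-- A and B differ only where A's dist = len(nums) initialisation makes it reject a first 1 (see D_ below).

-- ===== PORT A =====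
-- the for-loop of A, threading the running distance `dist`
def kLengthApartLoop (k : Int) : List Int → Int → Bool
  | [], _ => true
  | num :: rest, dist =>
    if num = 1 then
      if dist < k then false else kLengthApartLoop k rest 0
    else
      kLengthApartLoop k rest (dist + 1)

def kLengthApart (nums : List Int) (k : Int) : Bool :=
  kLengthApartLoop k nums (nums.length : Int)

-- ===== PORT B =====
def kLengthApart_alt (nums : List Int) (k : Int) : Bool :=
  let ones := ((PySem.List.enumerate nums 0).filter (fun p => p.2 == 1)).map (fun p => p.1)
  (ones.zip (ones.drop 1)).all (fun p => decide (p.2 - p.1 - 1 ≥ k))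

-- ===== PRECONDITION & SPEC =====
-- On inputs containing a 1 where k > len(nums) + index of the first 1 and all 1s really are at
-- least k apart, A returns False only because of its dist = len(nums) initialisation, while B
-- returns True, the intended answer since the first 1 has no predecessor.
def D_kLengthApart (nums : List Int) (k : Int) : Prop :=
  (1 : Int) ∈ nums ∧ (nums.length : Int) + (nums.idxOf 1 : Nat) < k ∧
    ∀ j < nums.length, ∀ i < j, nums[i]? = some 1 → nums[j]? = some 1 →
      (j : Int) - (i : Int) - 1 ≥ k

instance (nums : List Int) (k : Int) : Decidable (D_kLengthApart nums k) := by
  unfold D_kLengthApart; infer_instance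

def Spec_kLengthApart (nums : List Int) (k : Int) (out : Bool) : Prop :=
  ¬ D_kLengthApart nums k → out = kLengthApart_alt nums k
instance (nums : List Int) (k : Int) (out : Bool) : Decidable (Spec_kLengthApart nums k out) := by
  unfold Spec_kLengthApart; infer_instance

def pvDiffWitness_kLengthApart : List Int × Int := ([1], 2)
def pvDiffWitnessOut_kLengthApart : Bool × Bool := (false, true)

-- ===== CLAIM (what is proved, stated in full; the proofs are below) =====
def Claim_unchanged_kLengthApart : Prop := ∀ (nums : List Int) (k : Int), Dom_kLengthApart nums k → Spec_kLengthApart nums k (kLengthApart nums k)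
def Claim_changed_kLengthApart : Prop := Dom_kLengthApart (pvDiffWitness_kLengthApart.1) (pvDiffWitness_kLengthApart.2) ∧ D_kLengthApart (pvDiffWitness_kLengthApart.1) (pvDiffWitness_kLengthApart.2) ∧ kLengthApart (pvDiffWitness_kLengthApart.1) (pvDiffWitness_kLengthApart.2) = pvDiffWitnessOut_kLengthApart.1 ∧ kLengthApart_alt (pvDiffWitness_kLengthApart.1) (pvDiffWitness_kLengthApart.2) = pvDiffWitnessOut_kLengthApart.2 ∧ pvDiffWitnessOut_kLengthApart.1 ≠ pvDiffWitnessOut_kLengthApart.2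
def Claim_exact_kLengthApart : Prop := ∀ (nums : List Int) (k : Int), Dom_kLengthApart nums k → D_kLengthApart nums k → kLengthApart nums k ≠ kLengthApart_alt nums k

-- ===== LEMMAS AND PROOFS =====

-- indices (starting at i) of the 1s of l
def onesFrom : List Int → Int → List Int
  | [], _ => []
  | x :: r, i => if x = 1 then i :: onesFrom r (i + 1) else onesFrom r (i + 1)

-- consecutive-gap check of B, as a function of the ones list
def gapsB (k : Int) (l : List Int) : Bool :=
  (l.zip (l.drop 1)).all (fun p => decide (p.2 - p.1 - 1 ≥ k))

def headOK (k : Int) (l : List Int) (dist : Int) : Bool :=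
  match l with
  | [] => true
  | j :: _ => decide (k ≤ dist + j)

theorem gapsB_nil (k : Int) : gapsB k [] = true := rfl
theorem gapsB_single (k a : Int) : gapsB k [a] = true := rfl
theorem gapsB_cons2 (k a b : Int) (r : List Int) :
    gapsB k (a :: b :: r) = (decide (b - a - 1 ≥ k) && gapsB k (b :: r)) := by
  simp [gapsB]

theorem onesFrom_shift (l : List Int) (i : Int) :
    onesFrom l i = (onesFrom l 0).map (fun j => i + j) := by
  induction l generalizing i with
  | nil => simp [onesFrom]
  | cons x r ih =>
    by_cases hx : x = 1
    · simp only [onesFrom, if_pos hx, List.map_cons]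
      rw [show (0:Int)+1 = 1 from by norm_num]
      rw [ih (i + 1), ih 1, List.map_map]
      congr 1
      · omega
      · apply List.map_congr_left; intro a _; simp only [Function.comp_apply]; ring
    · simp only [onesFrom, if_neg hx]
      rw [show (0:Int)+1 = 1 from by norm_num]
      rw [ih (i + 1), ih 1, List.map_map]
      apply List.map_congr_left; intro a _; simp; ring

theorem gapsB_map_shift (k c : Int) (l : List Int) :
    gapsB k (l.map (fun j => c + j)) = gapsB k l := by
  induction l with
  | nil => rfl
  | cons a r ih =>
    cases r with
    | nil => rfl
    | cons b r' =>
      simp only [List.map_cons] at *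
      rw [gapsB_cons2, gapsB_cons2, ih]
      have : c + b - (c + a) - 1 = b - a - 1 := by ring
      rw [this]

-- characterisation of A's loop via the ones list
theorem loop_char (k : Int) (l : List Int) (dist : Int) :
    kLengthApartLoop k l dist = (headOK k (onesFrom l 0) dist && gapsB k (onesFrom l 0)) := by
  induction l generalizing dist with
  | nil => simp [kLengthApartLoop, onesFrom, headOK, gapsB]
  | cons x r ih =>
    by_cases hx : x = 1
    · simp only [kLengthApartLoop, if_pos hx, onesFrom]
      rw [show (0:Int)+1 = 1 from by norm_num]
      rw [ih 0, onesFrom_shift r 1]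
      rcases hS : onesFrom r 0 with _ | ⟨j, S'⟩
      · simp only [List.map_nil, headOK, gapsB_nil, gapsB_single, Bool.and_true]
        by_cases hd : dist < k
        · simp [hd]
        · simp [hd]
          omega
      · simp only [List.map_cons, headOK]
        rw [gapsB_cons2]
        have hsh : gapsB k ((1 + j) :: List.map (fun j => 1 + j) S') = gapsB k (j :: S') := by
          have h := gapsB_map_shift k 1 (j :: S')
          rw [List.map_cons] at h
          exact h
        rw [hsh]
        by_cases hd : dist < k
        · simp [hd]
        · simp [hd]
          intro _ _
          omega
    · simp only [kLengthApartLoop, if_neg hx, onesFrom]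
      rw [show (0:Int)+1 = 1 from by norm_num]
      rw [ih (dist + 1), onesFrom_shift r 1]
      rcases hS : onesFrom r 0 with _ | ⟨j, S'⟩
      · simp [headOK]
      · simp only [List.map_cons, headOK]
        have hsh : gapsB k ((1 + j) :: List.map (fun j => 1 + j) S') = gapsB k (j :: S') := by
          have := gapsB_map_shift k 1 (j :: S')
          simpa using this
        rw [hsh]
        have : dist + 1 + j = dist + (1 + j) := by ring
        rw [this]

theorem alt_eq_gapsB (nums : List Int) (k : Int) :
    kLengthApart_alt nums k = gapsB k (onesFrom nums 0) := by
  have key : ∀ (l : List Int) (s : Int),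
      ((PySem.List.enumerate l s).filter (fun p => p.2 == 1)).map (fun p => p.1) = onesFrom l s := by
    intro l
    induction l with
    | nil => intro s; simp [PySem.List.enumerate_nil, onesFrom]
    | cons x r ih =>
      intro s
      rw [PySem.List.enumerate_cons]
      by_cases hx : x = 1
      · simp [onesFrom, hx, ih (s + 1)]
      · simp [onesFrom, hx, ih (s + 1)]
  simp only [kLengthApart_alt, key nums 0, gapsB]

theorem mem_onesFrom (l : List Int) (i a : Int) :
    a ∈ onesFrom l i ↔ ∃ m : Nat, l[m]? = some 1 ∧ a = i + m := by
  induction l generalizing i with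
  | nil => simp [onesFrom]
  | cons x r ih =>
    by_cases hx : x = 1
    · simp only [onesFrom, if_pos hx, List.mem_cons, ih (i + 1)]
      constructor
      · rintro (rfl | ⟨m, hm, rfl⟩)
        · exact ⟨0, by simp [hx], by simp⟩
        · exact ⟨m + 1, by simpa using hm, by push_cast; ring⟩
      · rintro ⟨m, hm, rfl⟩
        cases m with
        | zero => left; simp
        | succ m' => right; exact ⟨m', by simpa using hm, by push_cast; ring⟩
    · simp only [onesFrom, if_neg hx, ih (i + 1)]
      constructor
      · rintro ⟨m, hm, rfl⟩
        exact ⟨m + 1, by simpa using hm, by push_cast; ring⟩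
      · rintro ⟨m, hm, rfl⟩
        cases m with
        | zero => simp at hm; exact absurd hm hx
        | succ m' => exact ⟨m', by simpa using hm, by push_cast; ring⟩

theorem onesFrom_lb (l : List Int) (i a : Int) (h : a ∈ onesFrom l i) : i ≤ a := by
  rw [mem_onesFrom] at h
  obtain ⟨m, _, rfl⟩ := h
  omega

theorem onesFrom_sorted (l : List Int) (i : Int) : (onesFrom l i).Pairwise (· < ·) := by
  induction l generalizing i with
  | nil => simp [onesFrom]
  | cons x r ih =>
    by_cases hx : x = 1
    · simp only [onesFrom, if_pos hx]
      refine List.pairwise_cons.mpr ⟨?_, ih (i + 1)⟩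
      intro a ha
      have := onesFrom_lb r (i + 1) a ha
      omega
    · simpa only [onesFrom, if_neg hx] using ih (i + 1)

theorem onesFrom_ne_nil_of_mem (l : List Int) (h : (1 : Int) ∈ l) : onesFrom l 0 ≠ [] := by
  obtain ⟨m, hm, hv⟩ := List.getElem_of_mem h
  intro hnil
  have : (0 : Int) + m ∈ onesFrom l 0 := by
    rw [mem_onesFrom]
    exact ⟨m, by simp [hv, List.getElem?_eq_getElem hm], rfl⟩
  rw [hnil] at this
  simp at this

theorem onesFrom_head (l : List Int) (i : Int) :
    onesFrom l i = [] ∨ ∃ t, onesFrom l i = (i + (l.idxOf 1 : Nat)) :: t ∧ (1 : Int) ∈ l := by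
  induction l generalizing i with
  | nil => left; rfl
  | cons x r ih =>
    by_cases hx : x = 1
    · right
      refine ⟨onesFrom r (i + 1), ?_, by simp [hx]⟩
      simp [onesFrom, hx]
    · rcases ih (i + 1) with h | ⟨t, ht, hmem⟩
      · left; simpa [onesFrom, hx] using h
      · right
        refine ⟨t, ?_, List.mem_cons_of_mem _ hmem⟩
        simp only [onesFrom, if_neg hx]
        rw [ht]
        have : List.idxOf 1 (x :: r) = List.idxOf 1 r + 1 := by
          simp [hx]
        rw [this]
        push_cast
        congr 1
        ring

theorem chain'_and_iff {α : Type} (R S : α → α → Prop) (l : List α) :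
    List.IsChain (fun a b => R a b ∧ S a b) l ↔ (List.IsChain R l ∧ List.IsChain S l) := by
  induction l with
  | nil => simp
  | cons a r ih =>
    cases r with
    | nil => simp
    | cons b r' =>
      rw [List.isChain_cons_cons, List.isChain_cons_cons, List.isChain_cons_cons, ih]
      tauto

-- gapsB as a Chain' statement
theorem gapsB_eq_chain (k : Int) (l : List Int) :
    gapsB k l = true ↔ List.IsChain (fun a b => k ≤ b - a - 1) l := by
  induction l with
  | nil => simp [gapsB_nil]
  | cons a r ih =>
    cases r with
    | nil => simp [gapsB_single]
    | cons b r' =>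
      rw [gapsB_cons2, List.isChain_cons_cons]
      simp only [Bool.and_eq_true, decide_eq_true_eq]
      rw [ih]

-- the pairwise condition of D_, restated on the ones list
theorem gapsB_iff_pairwise (k : Int) (nums : List Int) :
    gapsB k (onesFrom nums 0) = true ↔
      (onesFrom nums 0).Pairwise (fun a b => a < b ∧ k ≤ b - a - 1) := by
  haveI : Trans (fun a b : Int => a < b ∧ k ≤ b - a - 1)
      (fun a b : Int => a < b ∧ k ≤ b - a - 1) (fun a b : Int => a < b ∧ k ≤ b - a - 1) :=
    ⟨fun h1 h2 => ⟨by omega, by omega⟩⟩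
  rw [gapsB_eq_chain, ← List.isChain_iff_pairwise,
    chain'_and_iff (fun a b : Int => a < b) (fun a b : Int => k ≤ b - a - 1)]
  have hs : List.IsChain (fun a b : Int => a < b) (onesFrom nums 0) :=
    (List.isChain_iff_pairwise).mpr (onesFrom_sorted nums 0)
  tauto

-- D_'s index quantifier ↔ pairwise on the ones list
theorem pairwise_iff_D (k : Int) (nums : List Int) :
    (onesFrom nums 0).Pairwise (fun a b => a < b ∧ k ≤ b - a - 1) ↔
      (∀ j < nums.length, ∀ i < j, nums[i]? = some 1 → nums[j]? = some 1 →
        (j : Int) - (i : Int) - 1 ≥ k) := by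
  constructor
  · intro hp j hj i hij hi hj1
    have hmi : ((i : Int)) ∈ onesFrom nums 0 := by
      rw [mem_onesFrom]; exact ⟨i, hi, by simp⟩
    have hmj : ((j : Int)) ∈ onesFrom nums 0 := by
      rw [mem_onesFrom]; exact ⟨j, hj1, by simp⟩
    have hsym : ∀ a ∈ onesFrom nums 0, ∀ b ∈ onesFrom nums 0, a ≠ b →
        ((a < b ∧ k ≤ b - a - 1) ∨ (b < a ∧ k ≤ a - b - 1)) := by
      have hp' : (onesFrom nums 0).Pairwise
          (fun a b => (a < b ∧ k ≤ b - a - 1) ∨ (b < a ∧ k ≤ a - b - 1)) :=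
        hp.imp (fun h => Or.inl h)
      intro a ha b hb hab
      exact hp'.forall (fun {a b} h => h.symm) ha hb hab
    have hne : ((i : Int)) ≠ ((j : Int)) := by
      intro h; omega
    rcases hsym _ hmi _ hmj hne with ⟨_, h⟩ | ⟨h, _⟩
    · omega
    · omega
  · intro hq
    refine (onesFrom_sorted nums 0).imp_of_mem ?_
    intro a b ha hb hab
    rw [mem_onesFrom] at ha hb
    obtain ⟨mi, hmi, rfl⟩ := ha
    obtain ⟨mj, hmj, rfl⟩ := hb
    refine ⟨hab, ?_⟩
    have hmjlen : mj < nums.length := by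
      rcases List.getElem?_eq_some_iff.mp hmj with ⟨h, _⟩; exact h
    have := hq mj hmjlen mi (by omega) hmi hmj
    omega

theorem A_char (nums : List Int) (k : Int) :
    kLengthApart nums k =
      (headOK k (onesFrom nums 0) (nums.length : Int) && gapsB k (onesFrom nums 0)) :=
  loop_char k nums (nums.length : Int)

-- ===== VERDICT (by name: the statement is the Claim_ definition above) =====
theorem kLengthApart_spec : Claim_unchanged_kLengthApart := by
  intro nums k _ hnD
  rw [A_char, alt_eq_gapsB]
  rcases hS : onesFrom nums 0 with _ | ⟨j, t⟩
  · simp [headOK]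
  · simp only [headOK]
    by_cases hh : k ≤ (nums.length : Int) + j
    · simp [hh]
    · rcases hG : gapsB k (j :: t) with _ | _
      · simp
      · exfalso
        apply hnD
        rcases onesFrom_head nums 0 with h | ⟨t', ht', hmem⟩
        · rw [h] at hS; exact absurd hS (by simp)
        · have hj : (0 : Int) + (nums.idxOf 1 : Nat) = j := by
            rw [ht'] at hS
            exact (List.cons.injEq _ _ _ _ ▸ hS).1
          refine ⟨hmem, by omega, ?_⟩
          rw [← pairwise_iff_D k nums, ← gapsB_iff_pairwise, hS]
          exact hG

theorem kLengthApart_changed : Claim_changed_kLengthApart := by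
  unfold Claim_changed_kLengthApart; decide

theorem kLengthApart_tight : Claim_exact_kLengthApart := by
  intro nums k _ hD
  obtain ⟨hmem, hk, hq⟩ := hD
  rw [A_char, alt_eq_gapsB]
  have hG : gapsB k (onesFrom nums 0) = true := by
    rw [gapsB_iff_pairwise, pairwise_iff_D]
    exact hq
  rw [hG]
  rcases onesFrom_head nums 0 with h | ⟨t, ht, _⟩
  · exact absurd h (onesFrom_ne_nil_of_mem nums hmem)
  · rw [ht]
    simp only [headOK]
    have : ¬ k ≤ (nums.length : Int) + (0 + (nums.idxOf 1 : Nat)) := by omega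
    simp
    omega
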